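-- pv_equiv track=rewrite | github.com/TNG/KernelSbom | sbom/sbom/cmd_graph/savedcmd_parser/command_splitter.py | _find_first_top_level_command_separator
-- ===== SOURCE A (Python) =====
-- def _find_first_top_level_command_separator(
--     commands: str, separators: list[str] = [";", "&&"]
-- ) -> tuple[int | None, int | None]:
--     in_single_quote = False
--     in_double_quote = False
--     in_curly_braces = 0
--     in_braces = 0
--     for i, char in enumerate(commands):
--         if char == "'" and not in_double_quote:
--             # Toggle single quote state (unless inside double quotes)
--             in_single_quote = not in_single_quote
--         elif char == '"' and not in_single_quote:
--             # Toggle double quote state (unless inside single quotes)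
--             in_double_quote = not in_double_quote
--
--         if in_single_quote or in_double_quote:
--             continue
--
--         # Toggle braces state
--         if char == "{":
--             in_curly_braces += 1
--         if char == "}":
--             in_curly_braces -= 1
--
--         if char == "(":
--             in_braces += 1
--         if char == ")":
--             in_braces -= 1
--
--         if in_curly_braces > 0 or in_braces > 0:
--             continue
--
--         # return found separator position and separator length
--         for separator in separators:
--             if commands[i : i + len(separator)] == separator:
--                 return i, len(separator)
--
--     return None, None
-- ===== SOURCE B (Python) =====
-- def _toplevel_mask(commands):
--     # One pure pass: mask[i] is True iff index i is "top-level" in A's sense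
--     # (not inside quotes at i, and both brace counters <= 0 after processing i).
--     mask = []
--     sq = False
--     dq = False
--     curly = 0
--     paren = 0
--     for ch in commands:
--         if ch == "'" and not dq:
--             sq = not sq
--         elif ch == '"' and not sq:
--             dq = not dq
--         if sq or dq:
--             mask.append(False)
--         else:
--             if ch == "{":
--                 curly += 1
--             elif ch == "}":
--                 curly -= 1
--             if ch == "(":
--                 paren += 1
--             elif ch == ")":
--                 paren -= 1
--             mask.append(curly <= 0 and paren <= 0)
--     return mask
--
--
-- def _find_first_top_level_command_separator(
--     commands: str, separators: list[str] = [";", "&&"]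
-- ) -> tuple[int | None, int | None]:
--     mask = _toplevel_mask(commands)
--     for i, ok in enumerate(mask):
--         if not ok:
--             continue
--         for sep in separators:
--             if commands.startswith(sep, i):
--                 return i, len(sep)
--     return None, None
-- ===== Notes on version B (the rewrite author's own statement) =====
-- stated objective: alternative
-- what changed: Replaces A's single stateful scan with early return by a two-phase decomposition: a pure first pass builds a boolean top-level mask for every index, and a separate second pass searches the masked indices with str.startswith instead of slice comparison.
import Mathlib
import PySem

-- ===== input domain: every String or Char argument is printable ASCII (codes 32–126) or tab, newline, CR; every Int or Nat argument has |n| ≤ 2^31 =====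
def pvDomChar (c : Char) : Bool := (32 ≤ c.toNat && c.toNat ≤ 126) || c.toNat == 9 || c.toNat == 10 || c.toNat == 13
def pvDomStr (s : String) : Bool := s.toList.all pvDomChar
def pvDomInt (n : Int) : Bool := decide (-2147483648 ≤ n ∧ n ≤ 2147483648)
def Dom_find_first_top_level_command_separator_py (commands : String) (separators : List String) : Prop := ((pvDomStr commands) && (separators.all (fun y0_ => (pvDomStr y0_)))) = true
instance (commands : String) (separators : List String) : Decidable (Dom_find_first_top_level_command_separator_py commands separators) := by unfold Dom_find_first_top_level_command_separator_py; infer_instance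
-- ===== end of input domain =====

-- B replaces A's single early-returning stateful scan by a pure mask-building pass plus a
-- separate search pass (alternative decomposition, same asymptotic cost).

-- ===== PORT A =====
-- inner 'for separator in separators' loop: returns some (i, len(sep)) on the first slice match
def pvCheckSepsA (cs : List Char) (separators : List String) (i : Nat) : Option (Option Int × Option Int) :=
  match separators with
  | [] => none
  | sep :: rest =>
    if PySem.List.slice cs (some (i : Int)) (some ((i : Int) + (sep.length : Int))) = sep.toList
    then some (some (i : Int), some (sep.length : Int))
    else pvCheckSepsA cs rest i

def pvGoA (cs : List Char) (separators : List String) (i : Nat) (rest : List Char)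
    (sq dq : Bool) (curly par : Int) : Option Int × Option Int :=
  match rest with
  | [] => (none, none)
  | c :: t =>
    let sq' := if c == '\'' && !dq then !sq else sq
    let dq' := if !(c == '\'' && !dq) && (c == '"' && !sq) then !dq else dq
    if sq' || dq' then pvGoA cs separators (i+1) t sq' dq' curly par
    else
      let curly1 := if c == '{' then curly + 1 else curly
      let curly2 := if c == '}' then curly1 - 1 else curly1
      let par1 := if c == '(' then par + 1 else par
      let par2 := if c == ')' then par1 - 1 else par1
      if curly2 > 0 || par2 > 0 then pvGoA cs separators (i+1) t sq' dq' curly2 par2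
      else
        match pvCheckSepsA cs separators i with
        | some r => r
        | none => pvGoA cs separators (i+1) t sq' dq' curly2 par2

def find_first_top_level_command_separator_py (commands : String) (separators : List String) : Option Int × Option Int :=
  pvGoA commands.toList separators 0 commands.toList false false 0 0

-- ===== PORT B =====
-- _toplevel_mask from Source B
def pvMaskGo (rest : List Char) (sq dq : Bool) (curly par : Int) : List Bool :=
  match rest with
  | [] => []
  | c :: t =>
    let sq' := if c == '\'' && !dq then !sq else sq
    let dq' := if !(c == '\'' && !dq) && (c == '"' && !sq) then !dq else dq
    if sq' || dq' then false :: pvMaskGo t sq' dq' curly par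
    else
      let curly' := if c == '{' then curly + 1 else if c == '}' then curly - 1 else curly
      let par' := if c == '(' then par + 1 else if c == ')' then par - 1 else par
      (decide (curly' ≤ 0) && decide (par' ≤ 0)) :: pvMaskGo t sq' dq' curly' par'

-- commands.startswith(sep, i): exact for 0 ≤ i, ported as prefix test on the i-th suffix
def pvFirstSepB (cs : List Char) (separators : List String) (i : Nat) : Option (Option Int × Option Int) :=
  match separators with
  | [] => none
  | sep :: rest =>
    if PySem.Chars.startswith (cs.drop i) sep.toList
    then some (some (i : Int), some (sep.length : Int))
    else pvFirstSepB cs rest i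

def pvSearchGo (cs : List Char) (separators : List String) (i : Nat) (mask : List Bool) :
    Option Int × Option Int :=
  match mask with
  | [] => (none, none)
  | ok :: ms =>
    if !ok then pvSearchGo cs separators (i+1) ms
    else
      match pvFirstSepB cs separators i with
      | some r => r
      | none => pvSearchGo cs separators (i+1) ms

def find_first_top_level_command_separator_py_alt (commands : String) (separators : List String) : Option Int × Option Int :=
  pvSearchGo commands.toList separators 0 (pvMaskGo commands.toList false false 0 0)

-- ===== PRECONDITION & SPEC =====
def Spec_find_first_top_level_command_separator_py (commands : String) (separators : List String) (out : Option Int × Option Int) : Prop := out = find_first_top_level_command_separator_py_alt commands separators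
instance (commands : String) (separators : List String) (out : Option Int × Option Int) : Decidable (Spec_find_first_top_level_command_separator_py commands separators out) := by unfold Spec_find_first_top_level_command_separator_py; infer_instance

-- ===== CLAIM (what is proved, stated in full; the proofs are below) =====
def Claim_equal_find_first_top_level_command_separator_py : Prop := ∀ (commands : String) (separators : List String), Dom_find_first_top_level_command_separator_py commands separators → Spec_find_first_top_level_command_separator_py commands separators (find_first_top_level_command_separator_py commands separators)

-- ===== LEMMAS AND PROOFS =====

-- the two inner separator scans agree: slice equality = startswith on the i-th suffix
lemma pvCheckSepsA_eq_pvFirstSepB (cs : List Char) (separators : List String) (i : Nat) :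
    pvCheckSepsA cs separators i = pvFirstSepB cs separators i := by
  induction separators with
  | nil => rfl
  | cons sep rest ih =>
    simp only [pvCheckSepsA, pvFirstSepB, ih]
    congr 1
    rw [PySem.List.slice_natCast_add, PySem.Chars.startswith_iff]
    rw [List.prefix_iff_eq_take]
    exact propext eq_comm

-- A's sequential curly updates equal B's if/elif chain
lemma pv_curly_eq (c : Char) (curly : Int) :
    (if c == '}' then (if c == '{' then curly + 1 else curly) - 1
     else (if c == '{' then curly + 1 else curly))
    = (if c == '{' then curly + 1 else if c == '}' then curly - 1 else curly) := by
  simp only [beq_iff_eq]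
  by_cases h1 : c = '{' <;> by_cases h2 : c = '}' <;> simp_all

lemma pv_par_eq (c : Char) (par : Int) :
    (if c == ')' then (if c == '(' then par + 1 else par) - 1
     else (if c == '(' then par + 1 else par))
    = (if c == '(' then par + 1 else if c == ')' then par - 1 else par) := by
  simp only [beq_iff_eq]
  by_cases h1 : c = '(' <;> by_cases h2 : c = ')' <;> simp_all

-- main invariant: A's scan from any state equals B's search over the mask built from that state
lemma pv_main (cs : List Char) (separators : List String) :
    ∀ (rest : List Char) (i : Nat) (sq dq : Bool) (curly par : Int),
      pvGoA cs separators i rest sq dq curly par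
        = pvSearchGo cs separators i (pvMaskGo rest sq dq curly par) := by
  intro rest
  induction rest with
  | nil => intro i sq dq curly par; rfl
  | cons c t ih =>
    intro i sq dq curly par
    simp only [pvGoA, pvMaskGo, pv_curly_eq, pv_par_eq]
    set sq' := if c == '\'' && !dq then !sq else sq with hsq
    set dq' := if !(c == '\'' && !dq) && (c == '"' && !sq) then !dq else dq with hdq
    set curly' := if c == '{' then curly + 1 else if c == '}' then curly - 1 else curly with hc
    set par' := if c == '(' then par + 1 else if c == ')' then par - 1 else par with hp
    by_cases hq : (sq' || dq') = true
    · simp only [hq, if_true, pvSearchGo, Bool.not_false, if_true]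
      exact ih (i+1) sq' dq' curly par
    · simp only [hq, Bool.not_eq_true] at *
      simp only [Bool.false_eq_true, if_false, pvSearchGo]
      by_cases hb : (curly' > 0 || par' > 0) = true
      · have hmask : (decide (curly' ≤ 0) && decide (par' ≤ 0)) = false := by
          rcases Bool.or_eq_true_iff.mp hb with h | h <;>
            simp only [decide_eq_true_eq] at h <;> simp <;> omega
        simp only [hb, if_true, hmask, Bool.not_false, if_true]
        exact ih (i+1) sq' dq' curly' par'
      · have hmask : (decide (curly' ≤ 0) && decide (par' ≤ 0)) = true := by
          simp only [Bool.or_eq_true_iff, decide_eq_true_eq, not_or] at hb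
          simp only [Bool.and_eq_true, decide_eq_true_eq]
          omega
        simp only [hb, Bool.false_eq_true, if_false, hmask, Bool.not_true, if_false,
          pvCheckSepsA_eq_pvFirstSepB]
        cases pvFirstSepB cs separators i with
        | none => exact ih (i+1) sq' dq' curly' par'
        | some r => rfl

-- ===== VERDICT (by name: the statement is the Claim_ definition above) =====
theorem find_first_top_level_command_separator_py_spec : Claim_equal_find_first_top_level_command_separator_py := by
  intro commands separators _
  unfold Spec_find_first_top_level_command_separator_py
  unfold find_first_top_level_command_separator_py find_first_top_level_command_separator_py_alt
  exact pv_main commands.toList separators commands.toList 0 false false 0 0
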